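-- pv_equiv track=rewrite | github.com/Nicocoder47/Seccional-UF | backend/routes/afiliados.py | _csv_stream
-- ===== SOURCE A (Python) =====
-- from typing import Iterable
--
-- def _csv_stream(rows: Iterable[dict], columns: list[str]):
--     yield ",".join(columns) + "\r\n"
--     for row in rows:
--         line = []
--         for c in columns:
--             v = row.get(c, "")
--             s = str(v).replace('"', '""')
--             if any(ch in s for ch in [',', '\n', '\r', '"']):
--                 s = f'"{s}"'
--             line.append(s)
--         yield ",".join(line) + "\r\n"
-- ===== SOURCE B (Python) =====
-- def _quote_field(s):
--     # single pass: escape quotes and detect the need for quoting at once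
--     buf = []
--     quote = False
--     for ch in s:
--         if ch == '"':
--             buf.append('""')
--             quote = True
--         else:
--             if ch in ',\n\r':
--                 quote = True
--             buf.append(ch)
--     body = "".join(buf)
--     return '"' + body + '"' if quote else body
--
--
-- def _csv_stream(rows, columns):
--     yield ",".join(columns) + "\r\n"
--     for row in rows:
--         yield ",".join(_quote_field(str(row.get(c, ""))) for c in columns) + "\r\n"
-- ===== Notes on version B (the rewrite author's own statement) =====
-- stated objective: alternative
-- what changed: Replaces A's per-field replace() pass plus a separate any(ch in s) containment scan (and in-loop list accumulator) with a single per-character pass helper that escapes quotes and detects the need for quoting simultaneously, fields assembled by a generator expression.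
import Mathlib
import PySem

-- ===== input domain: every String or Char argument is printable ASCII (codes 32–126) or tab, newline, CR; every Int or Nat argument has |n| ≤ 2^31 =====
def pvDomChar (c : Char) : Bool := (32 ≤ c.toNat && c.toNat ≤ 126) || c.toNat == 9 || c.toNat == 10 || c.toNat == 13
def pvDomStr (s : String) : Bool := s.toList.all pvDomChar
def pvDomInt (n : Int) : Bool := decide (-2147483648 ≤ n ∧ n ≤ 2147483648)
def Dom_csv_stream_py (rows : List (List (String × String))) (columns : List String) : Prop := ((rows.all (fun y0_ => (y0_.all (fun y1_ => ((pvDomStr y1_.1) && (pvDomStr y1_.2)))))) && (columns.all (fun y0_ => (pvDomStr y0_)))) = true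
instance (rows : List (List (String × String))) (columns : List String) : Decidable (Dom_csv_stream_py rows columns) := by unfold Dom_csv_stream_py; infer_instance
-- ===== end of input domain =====

-- B replaces A's per-field replace() pass + separate containment scan with a single
-- per-character pass that escapes quotes and detects the need for quoting at once (alternative, not faster).


-- ===== PORT A =====
-- literal port of _csv_stream: per field, replace '"'→'""', then a separate
-- any(ch in s for ch in [',','\n','\r','"']) containment scan decides quoting.
def csv_stream_py (rows : List (List (String × String))) (columns : List String) : List String :=
  (PySem.Str.join "," columns ++ "\r\n") ::
  rows.map (fun row =>
    let line := columns.foldl (fun (line : List String) c =>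
      let v := PySem.Dict.getD (PySem.Dict.mk row) c ""
      let s := PySem.Str.replace v "\"" "\"\""
      let s := if [',', '\n', '\r', '"'].any (fun ch => PySem.Str.isIn (String.ofList [ch]) s)
               then "\"" ++ s ++ "\"" else s
      line ++ [s]) []
    PySem.Str.join "," line ++ "\r\n")

-- ===== PORT B =====
-- port of Source B's _quote_field: one foldl over the characters carrying (buf, quote)
def pvQuoteField (s : String) : String :=
  let st := s.toList.foldl (fun (st : List Char × Bool) ch =>
    if ch = '"' then (st.1 ++ ['"', '"'], true)
    else (st.1 ++ [ch], st.2 || PySem.Chars.isIn [ch] [',', '\n', '\r'])) ([], false)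
  if st.2 then "\"" ++ String.ofList st.1 ++ "\"" else String.ofList st.1

def csv_stream_py_alt (rows : List (List (String × String))) (columns : List String) : List String :=
  (PySem.Str.join "," columns ++ "\r\n") ::
  rows.map (fun row =>
    PySem.Str.join "," (columns.map (fun c => pvQuoteField (PySem.Dict.getD (PySem.Dict.mk row) c ""))) ++ "\r\n")

-- ===== PRECONDITION & SPEC =====
def Spec_csv_stream_py (rows : List (List (String × String))) (columns : List String) (out : List String) : Prop := out = csv_stream_py_alt rows columns
instance (rows : List (List (String × String))) (columns : List String) (out : List String) : Decidable (Spec_csv_stream_py rows columns out) := by unfold Spec_csv_stream_py; infer_instance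

-- ===== CLAIM (what is proved, stated in full; the proofs are below) =====
def Claim_equal_csv_stream_py : Prop := ∀ (rows : List (List (String × String))) (columns : List String), Dom_csv_stream_py rows columns → Spec_csv_stream_py rows columns (csv_stream_py rows columns)

-- ===== LEMMAS AND PROOFS =====

/-- escaping one character -/
def pvEsc (c : Char) : List Char := if c = '"' then ['"', '"'] else [c]

lemma pv_mem_esc {x c : Char} : x ∈ pvEsc c ↔ x = c := by
  by_cases h : c = '"' <;> simp [pvEsc, h]

lemma pv_mem_flatMap_esc {x : Char} {cs : List Char} :
    x ∈ cs.flatMap pvEsc ↔ x ∈ cs := by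
  simp only [List.mem_flatMap]
  constructor
  · rintro ⟨c, hc, hx⟩; rwa [pv_mem_esc.mp hx]
  · intro hx; exact ⟨x, hx, pv_mem_esc.mpr rfl⟩

lemma pv_isIn_singleton (c : Char) (l : List Char) :
    PySem.Chars.isIn [c] l = decide (c ∈ l) := by
  by_cases h : c ∈ l
  · simp [h, PySem.Chars.isIn_iff_infix, List.singleton_infix_iff]
  · simp only [h, decide_false]
    rw [← Bool.not_eq_true, PySem.Chars.isIn_iff_infix, List.singleton_infix_iff]
    exact h

lemma pv_replace_go_esc (fuel : Nat) (cs acc : List Char) (h : cs.length ≤ fuel) :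
    PySem.Chars.replace.go ['"'] ['"', '"'] fuel cs acc = acc.reverse ++ cs.flatMap pvEsc := by
  induction fuel generalizing cs acc with
  | zero =>
    cases cs with
    | nil => simp [PySem.Chars.replace.go]
    | cons c t => simp at h
  | succ n ih =>
    cases cs with
    | nil => simp [PySem.Chars.replace.go]
    | cons c t =>
      rw [PySem.Chars.replace.go]
      by_cases hc : c = '"'
      · subst hc
        have : List.isPrefixOf ['"'] ('"' :: t) = true := by simp [List.isPrefixOf]
        rw [if_pos this, ih _ _ (by simpa using Nat.le_of_succ_le_succ h)]
        simp [pvEsc]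
      · have : List.isPrefixOf ['"'] (c :: t) = false := by
          simp [List.isPrefixOf]; exact fun h' => (hc h'.symm).elim
        rw [if_neg (by simp [this]), ih _ _ (by simpa using Nat.le_of_succ_le_succ h)]
        simp [pvEsc, hc]

lemma pv_replace_esc (cs : List Char) :
    PySem.Chars.replace cs ['"'] ['"', '"'] = cs.flatMap pvEsc := by
  rw [PySem.Chars.replace]
  simp only [List.isEmpty_cons]
  simpa using pv_replace_go_esc cs.length cs [] le_rfl

/-- B's per-character fold, unrolled -/
lemma pv_fold_spec (cs : List Char) (acc : List Char) (q : Bool) :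
    cs.foldl (fun (st : List Char × Bool) ch =>
      if ch = '"' then (st.1 ++ ['"', '"'], true)
      else (st.1 ++ [ch], st.2 || PySem.Chars.isIn [ch] [',', '\n', '\r'])) (acc, q)
    = (acc ++ cs.flatMap pvEsc,
       q || cs.any (fun c => c = '"' || decide (c ∈ ([',', '\n', '\r'] : List Char)))) := by
  induction cs generalizing acc q with
  | nil => simp
  | cons c t ih =>
    by_cases hc : c = '"'
    · subst hc; simp [List.foldl_cons, ih, pvEsc]
    · rw [List.foldl_cons, if_neg hc, ih]
      simp [pvEsc, hc, pv_isIn_singleton, Bool.or_assoc]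

/-- the two per-field functions agree -/
lemma pv_field_eq (v : String) :
    (let s := PySem.Str.replace v "\"" "\"\""
     if [',', '\n', '\r', '"'].any (fun ch => PySem.Str.isIn (String.ofList [ch]) s)
     then "\"" ++ s ++ "\"" else s) = pvQuoteField v := by
  have hrep : PySem.Str.replace v "\"" "\"\"" = String.ofList (v.toList.flatMap pvEsc) := by
    rw [PySem.Str.replace]
    congr 1
    have h1 : ("\"" : String).toList = ['"'] := by decide
    have h2 : ("\"\"" : String).toList = ['"', '"'] := by decide
    rw [h1, h2, pv_replace_esc]
  have hcond : ([',', '\n', '\r', '"'].any (fun ch =>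
      PySem.Str.isIn (String.ofList [ch]) (String.ofList (v.toList.flatMap pvEsc))))
      = v.toList.any (fun c => c = '"' || decide (c ∈ ([',', '\n', '\r'] : List Char))) := by
    simp only [PySem.Str.isIn, String.toList_ofList, pv_isIn_singleton]
    rw [Bool.eq_iff_iff]
    simp only [List.any_eq_true, List.mem_cons, List.not_mem_nil, or_false, decide_eq_true_eq,
      pv_mem_flatMap_esc, Bool.or_eq_true]
    constructor
    · rintro ⟨ch, hch, hmem⟩; exact ⟨ch, hmem, by tauto⟩
    · rintro ⟨c, hc, h⟩; exact ⟨c, by tauto, hc⟩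
  rw [pvQuoteField, pv_fold_spec]
  simp only [hrep, hcond, List.nil_append, Bool.false_or]

theorem pv_rows_eq (rows : List (List (String × String))) (columns : List String) :
    csv_stream_py rows columns = csv_stream_py_alt rows columns := by
  unfold csv_stream_py csv_stream_py_alt
  congr 1
  apply List.map_congr_left
  intro row _
  dsimp only
  congr 2
  rw [PySem.List.foldl_append_singleton_eq_map]
  apply List.map_congr_left
  intro c _
  exact pv_field_eq (PySem.Dict.getD (PySem.Dict.mk row) c "")

-- ===== VERDICT (by name: the statement is the Claim_ definition above) =====
theorem csv_stream_py_spec : Claim_equal_csv_stream_py := by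
  intro rows columns _
  unfold Spec_csv_stream_py
  exact pv_rows_eq rows columns
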